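-- pv_equiv track=rewrite | github.com/zhangheng0027/dou | env/gameUtils.py | selectTwo
-- ===== SOURCE A (Python) =====
-- def selectTwo(ar: []):
--     cou = 0
--     for i, val in enumerate(ar):
--         if val >= 2:
--             cou += 1
--         elif cou >= 3:
--             for j in range(i - cou, i):
--                 ar[j] -= 2
--             return i - 1, cou
--         else:
--             cou = 0
--     return -1, 0
-- ===== SOURCE B (Python) =====
-- def selectTwo(ar: []):
--     for i in range(3, len(ar)):
--         if ar[i] < 2 and ar[i - 1] >= 2 and ar[i - 2] >= 2 and ar[i - 3] >= 2:
--             s = i - 3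
--             while s > 0 and ar[s - 1] >= 2:
--                 s -= 1
--             for k in range(s, i):
--                 ar[k] -= 2
--             return i - 1, i - s
--     return -1, 0
-- ===== Notes on version B (the rewrite author's own statement) =====
-- stated objective: alternative
-- what changed: B searches for the terminating element of a qualifying run directly (first i>=3 with ar[i]<2 preceded by three values >=2) and then walks backwards to recover the run start, instead of A's forward per-element consecutive counter.
import Mathlib
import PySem

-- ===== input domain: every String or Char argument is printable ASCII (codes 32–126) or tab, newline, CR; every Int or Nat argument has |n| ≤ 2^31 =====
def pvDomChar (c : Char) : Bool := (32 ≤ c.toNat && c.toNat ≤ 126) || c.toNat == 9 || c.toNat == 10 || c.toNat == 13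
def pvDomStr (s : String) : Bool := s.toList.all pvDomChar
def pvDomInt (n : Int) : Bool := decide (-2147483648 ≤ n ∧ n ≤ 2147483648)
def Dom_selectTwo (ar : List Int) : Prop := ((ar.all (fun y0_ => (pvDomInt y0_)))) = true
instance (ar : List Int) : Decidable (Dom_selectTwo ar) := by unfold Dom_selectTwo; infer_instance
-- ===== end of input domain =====

-- B finds the run's TERMINATOR directly (first index i >= 3 with ar[i] < 2 preceded by three
-- values >= 2) and then walks backwards to the run start, instead of A's forward per-element
-- counter; same cost, different decomposition. Both Pythons mutate ar in place identically;
-- the equivalence proved here is about the RETURN value only.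

-- ===== PORT A =====
-- enumerate(ar) (generalized to an arbitrary start index)
def pvEnumFrom (i : Int) : List Int → List (Int × Int)
  | [] => []
  | v :: rest => (i, v) :: pvEnumFrom (i + 1) rest

-- the for-loop of A: state is the counter `cou`; early return on the elif branch
def pvGoA : List (Int × Int) → Int → Int × Int
  | [], _ => (-1, 0)
  | (i, v) :: rest, cou =>
    if v ≥ 2 then pvGoA rest (cou + 1)
    else if cou ≥ 3 then (i - 1, cou)
    else pvGoA rest 0

def selectTwo (ar : List Int) : Int × Int := pvGoA (pvEnumFrom 0 ar) 0

-- ===== PORT B =====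
-- the inner while loop of B: walk s backwards while the predecessor is >= 2
-- (ar[s-1] is always in range when reached in B; getD's default is never used on B's calls)
def pvBack (ar : List Int) : Nat → Nat
  | 0 => 0
  | s + 1 => if 2 ≤ ar.getD s 0 then pvBack ar s else s + 1

-- the for-loop of B over range(3, len(ar)): look for the closing element of a qualifying run
def pvScan (ar : List Int) (i : Nat) : Int × Int :=
  if h : i < ar.length then
    if ar.getD i 0 < 2 ∧ 2 ≤ ar.getD (i - 1) 0 ∧ 2 ≤ ar.getD (i - 2) 0 ∧ 2 ≤ ar.getD (i - 3) 0 then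
      ((i : Int) - 1, (i : Int) - (pvBack ar (i - 3) : Int))
    else pvScan ar (i + 1)
  else (-1, 0)
termination_by ar.length - i

def selectTwo_alt (ar : List Int) : Int × Int := pvScan ar 3

-- ===== PRECONDITION & SPEC =====
def Spec_selectTwo (ar : List Int) (out : Int × Int) : Prop := out = selectTwo_alt ar
instance (ar : List Int) (out : Int × Int) : Decidable (Spec_selectTwo ar out) := by unfold Spec_selectTwo; infer_instance

-- ===== CLAIM (what is proved, stated in full; the proofs are below) =====
def Claim_equal_selectTwo : Prop := ∀ (ar : List Int), Dom_selectTwo ar → Spec_selectTwo ar (selectTwo ar)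

-- ===== LEMMAS AND PROOFS =====

-- backRun ar i = length of the maximal run of values >= 2 ending just before index i
def backRun (ar : List Int) : Nat → Nat
  | 0 => 0
  | i + 1 => if 2 ≤ ar.getD i 0 then backRun ar i + 1 else 0

-- common middle form of both programs: scan for the first i with ar[i] < 2 and backRun >= 3
def specFrom (ar : List Int) (i : Nat) : Int × Int :=
  if h : i < ar.length then
    if ar.getD i 0 < 2 ∧ 3 ≤ backRun ar i then ((i : Int) - 1, (backRun ar i : Int))
    else specFrom ar (i + 1)
  else (-1, 0)
termination_by ar.length - i

theorem backRun_succ (ar : List Int) (i : Nat) :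
    backRun ar (i + 1) = if 2 ≤ ar.getD i 0 then backRun ar i + 1 else 0 := rfl

theorem backRun_le (ar : List Int) : ∀ i, backRun ar i ≤ i := by
  intro i; induction i with
  | zero => simp [backRun]
  | succ k ih => unfold backRun; split <;> omega

theorem pvBack_eq (ar : List Int) : ∀ s, pvBack ar s = s - backRun ar s := by
  intro s; induction s with
  | zero => simp [pvBack, backRun]
  | succ k ih =>
    have h := backRun_le ar k
    unfold pvBack backRun
    split <;> omega

-- A's loop started at index i with the correct counter equals the middle form
theorem A_eq_spec (ar : List Int) : ∀ d i, ar.length - i ≤ d →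
    pvGoA (pvEnumFrom (i : Int) (ar.drop i)) ((backRun ar i : Int)) = specFrom ar i := by
  intro d
  induction d with
  | zero =>
    intro i hi
    have hlen : ar.length ≤ i := by omega
    rw [List.drop_eq_nil_of_le hlen, specFrom]
    simp [pvEnumFrom, pvGoA, Nat.not_lt.mpr hlen]
  | succ n ih =>
    intro i hi
    by_cases h : i < ar.length
    · have hdrop : ar.drop i = ar[i] :: ar.drop (i + 1) := List.drop_eq_getElem_cons h
      have hg : ar.getD i 0 = ar[i] := List.getD_eq_getElem ar 0 h
      rw [specFrom, dif_pos h, hdrop]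
      by_cases hv : (2:Int) ≤ ar[i]
      · -- value >= 2: counter increments, spec condition fails
        have hb : backRun ar (i + 1) = backRun ar i + 1 := by
          rw [backRun_succ, if_pos (by rw [hg]; exact hv)]
        rw [if_neg (by rw [hg]; omega)]
        have : pvGoA (pvEnumFrom (i : Int) (ar[i] :: ar.drop (i + 1))) (backRun ar i : Int)
            = pvGoA (pvEnumFrom ((i : Int) + 1) (ar.drop (i + 1))) ((backRun ar i : Int) + 1) := by
          simp [pvEnumFrom, pvGoA, hv]
        rw [this]
        have hcast : (backRun ar i : Int) + 1 = ((backRun ar (i + 1) : Nat) : Int) := by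
          rw [hb]; push_cast; ring
        rw [hcast]
        have hih := ih (i + 1) (by omega)
        push_cast at hih ⊢
        exact hih
      · -- value < 2: return if counter >= 3, else reset
        have hb : backRun ar (i + 1) = 0 := by
          rw [backRun_succ, if_neg (by rw [hg]; exact hv)]
        by_cases hc : 3 ≤ backRun ar i
        · rw [if_pos ⟨by rw [hg]; omega, hc⟩]
          simp [pvEnumFrom, pvGoA, hv]
          intro hge; exfalso; omega
        · rw [if_neg (by rintro ⟨_, h3⟩; exact hc h3)]
          have : pvGoA (pvEnumFrom (i : Int) (ar[i] :: ar.drop (i + 1))) (backRun ar i : Int)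
              = pvGoA (pvEnumFrom ((i : Int) + 1) (ar.drop (i + 1))) 0 := by
            have hlt : ¬ ((2:Int) ≤ ar[i]) := hv
            have hcou : ¬ ((backRun ar i : Int) ≥ 3) := by
              intro hx; apply hc; omega
            simp [pvEnumFrom, pvGoA, hlt, hcou]
          rw [this]
          have := ih (i + 1) (by omega)
          rw [hb] at this
          push_cast at this ⊢
          rw [← this]
    · rw [List.drop_eq_nil_of_le (by omega), specFrom]
      simp [pvEnumFrom, pvGoA, h]

-- for i >= 3 the 3-element window test is exactly backRun >= 3
theorem window_iff (ar : List Int) (k : Nat) :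
    (3 ≤ backRun ar (k + 3)) ↔
      (2 ≤ ar.getD (k + 2) 0 ∧ 2 ≤ ar.getD (k + 1) 0 ∧ 2 ≤ ar.getD k 0) := by
  rw [backRun_succ, backRun_succ, backRun_succ]
  split_ifs <;> simp_all

-- B's scan from any index >= 3 equals the middle form
theorem B_eq_spec (ar : List Int) : ∀ d i, ar.length - i ≤ d → 3 ≤ i →
    pvScan ar i = specFrom ar i := by
  intro d
  induction d with
  | zero =>
    intro i hi _
    rw [pvScan, specFrom]
    simp [Nat.not_lt.mpr (show ar.length ≤ i by omega)]
  | succ n ih =>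
    intro i hi h3
    by_cases h : i < ar.length
    · obtain ⟨k, rfl⟩ : ∃ k, i = k + 3 := ⟨i - 3, by omega⟩
      rw [pvScan, specFrom, dif_pos h, dif_pos h]
      have hw := window_iff ar k
      have hidx : k + 3 - 1 = k + 2 ∧ k + 3 - 2 = k + 1 ∧ k + 3 - 3 = k := by omega
      obtain ⟨e1, e2, e3⟩ := hidx
      rw [e1, e2, e3]
      by_cases hcond : ar.getD (k + 3) 0 < 2 ∧ 2 ≤ ar.getD (k + 2) 0 ∧ 2 ≤ ar.getD (k + 1) 0 ∧ 2 ≤ ar.getD k 0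
      · rw [if_pos hcond, if_pos ⟨hcond.1, hw.mpr hcond.2⟩]
        -- value component: (k+3) - pvBack (k) = backRun (k+3)
        have hb3 : backRun ar (k + 3) = backRun ar k + 3 := by
          obtain ⟨_, h2, h1, h0⟩ := hcond
          rw [backRun_succ, if_pos h2, backRun_succ, if_pos h1, backRun_succ, if_pos h0]
        have hpb := pvBack_eq ar k
        have hle := backRun_le ar k
        have : ((k : Int) + 3) - (pvBack ar k : Int) = (backRun ar (k + 3) : Int) := by
          rw [hb3, hpb]; push_cast [Nat.cast_sub hle]; ring
        simp only [Prod.mk.injEq]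
        push_cast [hpb, hb3, Nat.cast_sub hle] at this ⊢
        exact ⟨trivial, this⟩
      · rw [if_neg hcond, if_neg (by rintro ⟨ha, hb⟩; exact hcond ⟨ha, hw.mp hb⟩)]
        exact ih (k + 3 + 1) (by omega) (by omega)
    · rw [pvScan, specFrom]; simp [h]

-- the middle form skips indices 0,1,2 (backRun there is < 3)
theorem spec_skip (ar : List Int) (i : Nat) (hi : i < 3) :
    specFrom ar i = specFrom ar (i + 1) := by
  rw [specFrom]
  split
  · rw [if_neg]
    rintro ⟨_, h3⟩
    have := backRun_le ar i
    omega
  · rw [specFrom]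
    split
    · omega
    · rfl

-- ===== VERDICT (by name: the statement is the Claim_ definition above) =====
theorem selectTwo_spec : Claim_equal_selectTwo := by
  intro ar _
  unfold Spec_selectTwo selectTwo selectTwo_alt
  have hA : pvGoA (pvEnumFrom 0 ar) 0 = specFrom ar 0 := by
    have := A_eq_spec ar ar.length 0 (by omega)
    simpa [backRun] using this
  rw [hA, spec_skip ar 0 (by omega), spec_skip ar 1 (by omega), spec_skip ar 2 (by omega)]
  exact (B_eq_spec ar ar.length 3 (by omega) (by omega)).symm
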